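-- pv_equiv track=rewrite | github.com/vsagasta/comp110-21s-workspace | projects/pj01/data_utils.py | bool_count
-- ===== SOURCE A (Python) =====
-- def bool_count(values: list[bool]) -> dict[bool, int]:
--     """This will produce a dictionary where each key is the number of times that value appeared."""
--     counts: dict[bool, int] = {}
--     for item in values:
--         if item in counts:
--             counts[item] += 1
--         else:
--             counts[item] = 1
--     return counts
-- ===== SOURCE B (Python) =====
-- def bool_count(values: list[bool]) -> dict[bool, int]:
--     """This will produce a dictionary where each key is the number of times that value appeared."""
--     return {v: values.count(v) for v in dict.fromkeys(values)}
-- ===== Notes on version B (the rewrite author's own statement) =====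
-- stated objective: idiomatic
-- what changed: B replaces A's running-accumulator dict loop with a dict comprehension over the distinct values (dict.fromkeys) that counts each key with one values.count rescan.
import Mathlib
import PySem

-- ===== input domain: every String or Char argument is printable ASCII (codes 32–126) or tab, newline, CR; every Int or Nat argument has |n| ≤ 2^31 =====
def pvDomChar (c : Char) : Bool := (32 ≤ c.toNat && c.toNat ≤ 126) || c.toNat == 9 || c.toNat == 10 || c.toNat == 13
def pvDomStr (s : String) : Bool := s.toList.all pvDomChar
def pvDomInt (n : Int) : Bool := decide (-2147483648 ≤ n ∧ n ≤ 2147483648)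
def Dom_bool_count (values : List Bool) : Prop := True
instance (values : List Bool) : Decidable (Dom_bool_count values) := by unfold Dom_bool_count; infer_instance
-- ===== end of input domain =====

-- B replaces A's running-accumulator dict loop with a distinct-keys (dict.fromkeys) comprehension
-- counting each key by a full rescan (values.count); idiomatic, same result and key order.


-- ===== PORT A =====
def bool_count (values : List Bool) : List (Bool × Int) :=
  (values.foldl
    (fun counts item =>
      if counts.contains item then
        counts.insert item (counts.getD item 0 + 1)   -- counts[item] += 1
      else
        counts.insert item 1)                          -- counts[item] = 1
    PySem.Dict.empty).items

-- ===== PORT B =====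
def bool_count_alt (values : List Bool) : List (Bool × Int) :=
  (PySem.List.dedup values).map (fun v => (v, (values.count v : Int)))

-- ===== PRECONDITION & SPEC =====
def Spec_bool_count (values : List Bool) (out : List (Bool × Int)) : Prop := out = bool_count_alt values
instance (values : List Bool) (out : List (Bool × Int)) : Decidable (Spec_bool_count values out) := by unfold Spec_bool_count; infer_instance

-- ===== CLAIM (what is proved, stated in full; the proofs are below) =====
def Claim_equal_bool_count : Prop := ∀ (values : List Bool), Dom_bool_count values → Spec_bool_count values (bool_count values)

-- ===== LEMMAS AND PROOFS =====

-- A's two branches are one insert: when the key is absent its current default count is 0.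
theorem bool_count_step_eq (d : PySem.Dict Bool Int) (x : Bool) :
    (if d.contains x then d.insert x (d.getD x 0 + 1) else d.insert x 1)
      = d.insert x (d.getD x 0 + 1) := by
  by_cases h : d.contains x = true
  · simp [h]
  · have h0 : d.getD x 0 = 0 := PySem.Dict.getD_of_not_contains d 0 (by simpa using h)
    simp [h, h0]

-- ===== VERDICT (by name: the statement is the Claim_ definition above) =====
theorem bool_count_spec : Claim_equal_bool_count := by
  intro values _
  unfold Spec_bool_count bool_count bool_count_alt
  have hf : (fun (counts : PySem.Dict Bool Int) item =>
      if counts.contains item then counts.insert item (counts.getD item 0 + 1)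
      else counts.insert item 1)
      = fun (d : PySem.Dict Bool Int) x => d.insert x (d.getD x 0 + 1) := by
    funext d x; exact bool_count_step_eq d x
  rw [hf, PySem.Dict.foldl_insert_getD_add_one_eq_counter, PySem.Dict.items_counter]
  simp [PySem.List.dedup_eq_ofList]
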